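-- pv_equiv track=rewrite | github.com/mdalzell/advent-of-code-2019 | aoc2019/helpers/day22.py | shuffleNewDeck
-- ===== SOURCE A (Python) =====
-- _DEAL_WITH_INCREMENT = "deal with increment"
--
-- _CUT = "cut "
--
-- def shuffleNewDeck(deckSize, instructions):
--     deck = list(range(0, deckSize))
--
--     for instruction in instructions:
--         if _DEAL_WITH_INCREMENT in instruction:
--             increment = _getInstructionValue(instruction)
--             deck = _dealWithIncrement(deck, increment)
--         elif _CUT in instruction:
--             cut = _getInstructionValue(instruction)
--             deck = _cutDeck(deck, cut)
--         else:
--             _dealIntoNewStack(deck)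
--
--     return deck
--
-- def _getInstructionValue(instruction):
--     return int(instruction.split(' ')[-1])
--
-- def _dealIntoNewStack(deck):
--     deck.reverse()
--
-- def _cutDeck(deck, number):
--     return  deck[number:] + deck[:number]
--
-- def _dealWithIncrement(deck, increment):
--     currentIndex = 0
--     newDeck = [None] * len(deck)
--
--     while len(deck) > 0:
--         currentCard = deck.pop(0)
--         newDeck[currentIndex] = currentCard
--
--         currentIndex += increment
--
--         if currentIndex > len(newDeck) - 1:
--             currentIndex = currentIndex - len(newDeck)
--
--     return newDeck
-- ===== SOURCE B (Python) =====
-- def shuffleNewDeck(deckSize, instructions):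
--     # Compose all instructions into one affine position map x -> (a*x + b) % n,
--     # then fill the output deck in a single pass (return value only; A mutates
--     # nothing observable). Cut offsets clamp to [-n, n] exactly as Python
--     # slicing does, so oversized cuts leave the deck unchanged.
--     if deckSize <= 0:
--         return []
--     n = deckSize
--     a, b = 1, 0  # card x currently sits at position (a*x + b) % n
--     for instruction in instructions:
--         if "deal with increment" in instruction:
--             m = int(instruction.split(' ')[-1])
--             a, b = a * m % n, b * m % n
--         elif "cut " in instruction:
--             k = int(instruction.split(' ')[-1])
--             b = (b - max(-n, min(n, k))) % n
--         else:
--             a, b = -a % n, (n - 1 - b) % n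
--     deck = [0] * n
--     for x in range(n):
--         deck[(a * x + b) % n] = x
--     return deck
-- ===== Notes on version B (the rewrite author's own statement) =====
-- stated objective: faster
-- what changed: Instead of materialising and re-shuffling the whole deck per instruction (with an O(n^2) pop(0) loop for increments), B composes all instructions into one affine position map x -> (a*x+b) mod n (cuts clamped to [-n,n] like Python slicing) and fills the output list in a single pass.
-- outside the precondition, e.g. on shuffleNewDeck(4, ['deal with increment 2']): A returns [2, None, 3, None], B returns [2, 0, 3, 0]
import Mathlib
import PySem

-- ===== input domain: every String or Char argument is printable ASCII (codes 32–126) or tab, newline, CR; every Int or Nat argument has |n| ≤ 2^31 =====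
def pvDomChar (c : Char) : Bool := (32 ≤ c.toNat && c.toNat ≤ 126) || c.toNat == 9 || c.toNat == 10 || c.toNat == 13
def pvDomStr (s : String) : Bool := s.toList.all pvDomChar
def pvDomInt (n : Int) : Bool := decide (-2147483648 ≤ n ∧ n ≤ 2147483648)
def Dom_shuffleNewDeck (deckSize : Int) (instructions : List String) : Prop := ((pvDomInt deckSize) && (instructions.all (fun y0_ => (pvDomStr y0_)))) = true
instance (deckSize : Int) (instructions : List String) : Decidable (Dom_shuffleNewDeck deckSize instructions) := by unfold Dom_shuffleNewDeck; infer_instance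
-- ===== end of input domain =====

-- B replaces A's per-instruction deck rebuilding by composing one affine position map
-- x ↦ (a*x+b) mod n over all instructions (cuts clamped to [-n,n] like Python slicing)
-- and filling the output list once (return value only).

-- int(instruction.split(' ')[-1]) as an Option (none = ValueError, excluded by Pre_); shared by both ports
def pvParse? (s : String) : Option Int :=
  match PySem.Str.split? s " " with
  | none => none
  | some parts =>
    match PySem.List.pyGet? parts (-1) with
    | none => none
    | some w => PySem.Int.ofStr? w

-- ===== PORT A =====
-- _getInstructionValue; the ValueError case (pvParse? = none) is excluded by Pre_, 0 is a dummy there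
def pvGetInstructionValue (instruction : String) : Int := (pvParse? instruction).getD 0

-- _dealIntoNewStack (in-place reverse; return value is the reversed deck)
def pvDealIntoNewStack (deck : List Int) : List Int := deck.reverse

-- _cutDeck: deck[number:] + deck[:number]
def pvCutDeck (deck : List Int) (number : Int) : List Int :=
  PySem.List.slice deck (some number) none ++ PySem.List.slice deck none (some number)

-- the while-loop of _dealWithIncrement: pop(0), newDeck[currentIndex] = card, advance index
def pvDwiLoop (increment : Int) : List Int → List Int → Int → List Int
  | [], newDeck, _ => newDeck
  | currentCard :: rest, newDeck, currentIndex =>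
    let nd := PySem.List.pySetD newDeck currentIndex currentCard
    let i1 := currentIndex + increment
    let i2 := if i1 > PySem.List.len nd - 1 then i1 - PySem.List.len nd else i1
    pvDwiLoop increment rest nd i2

-- _dealWithIncrement: newDeck = [None]*len(deck); None cells are modeled as 0 — Pre_ guarantees
-- every cell is written (and pySetD's out-of-range IndexError cases are excluded by Pre_ too)
def pvDealWithIncrement (deck : List Int) (increment : Int) : List Int :=
  pvDwiLoop increment deck (List.replicate deck.length 0) 0

-- the body of A's for-loop over instructions
def pvShuffleStep (deck : List Int) (instruction : String) : List Int :=
  if PySem.Str.isIn "deal with increment" instruction then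
    pvDealWithIncrement deck (pvGetInstructionValue instruction)
  else if PySem.Str.isIn "cut " instruction then
    pvCutDeck deck (pvGetInstructionValue instruction)
  else
    pvDealIntoNewStack deck

def shuffleNewDeck (deckSize : Int) (instructions : List String) : List Int :=
  instructions.foldl pvShuffleStep (PySem.List.pyRange 0 deckSize 1)

-- ===== PORT B =====
-- one instruction updates the affine map (a, b): card x sits at position (a*x + b) % n;
-- a cut offset is clamped to [-n, n] (Python slice semantics) before entering the map
def pvAltStep (n : Int) (ab : Int × Int) (instruction : String) : Int × Int :=
  if PySem.Str.isIn "deal with increment" instruction then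
    let m := (pvParse? instruction).getD 0
    (PySem.Int.mod (ab.1 * m) n, PySem.Int.mod (ab.2 * m) n)
  else if PySem.Str.isIn "cut " instruction then
    let k := (pvParse? instruction).getD 0
    (ab.1, PySem.Int.mod (ab.2 - max (-n) (min n k)) n)
  else
    (PySem.Int.mod (-ab.1) n, PySem.Int.mod (n - 1 - ab.2) n)

def shuffleNewDeck_alt (deckSize : Int) (instructions : List String) : List Int :=
  if deckSize ≤ 0 then []
  else
    let ab := instructions.foldl (pvAltStep deckSize) (1, 0)
    (PySem.List.pyRange 0 deckSize 1).foldl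
      (fun deck x => PySem.List.pySetD deck (PySem.Int.mod (ab.1 * x + ab.2) deckSize) x)
      (List.replicate deckSize.toNat 0)

-- ===== PRECONDITION & SPEC =====
-- Pre_ excludes instructions on which A raises (unparsable last token → ValueError; increments
-- outside [-1, deckSize+1] → IndexError) and increments not coprime to the deck size, where A
-- returns a list still containing None — not a list of ints. Cut values are unrestricted.
def pvInstrOk (deckSize : Int) (s : String) : Bool :=
  if PySem.Str.isIn "deal with increment" s then
    match pvParse? s with
    | none => false
    | some m =>
      decide (deckSize ≤ 1) ||
        (decide (-1 ≤ m ∧ m ≤ deckSize + 1) && decide (Int.gcd (PySem.Int.mod m deckSize) deckSize = 1))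
  else if PySem.Str.isIn "cut " s then
    match pvParse? s with
    | none => false
    | some _ => true
  else true

def Pre_shuffleNewDeck (deckSize : Int) (instructions : List String) : Prop :=
  instructions.all (pvInstrOk deckSize) = true

instance (deckSize : Int) (instructions : List String) : Decidable (Pre_shuffleNewDeck deckSize instructions) := by
  unfold Pre_shuffleNewDeck; infer_instance

def pvWitness_shuffleNewDeck : Int × List String :=
  (10, ["deal with increment 3", "cut -4", "deal into new stack"])

def Spec_shuffleNewDeck (deckSize : Int) (instructions : List String) (out : List Int) : Prop := out = shuffleNewDeck_alt deckSize instructions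
instance (deckSize : Int) (instructions : List String) (out : List Int) : Decidable (Spec_shuffleNewDeck deckSize instructions out) := by unfold Spec_shuffleNewDeck; infer_instance

-- ===== CLAIM (what is proved, stated in full; the proofs are below) =====
def Claim_equal_shuffleNewDeck : Prop := ∀ (deckSize : Int) (instructions : List String), Dom_shuffleNewDeck deckSize instructions → Pre_shuffleNewDeck deckSize instructions → Spec_shuffleNewDeck deckSize instructions (shuffleNewDeck deckSize instructions)

-- ===== LEMMAS AND PROOFS =====

-- the loop invariant tying A's concrete deck to B's affine map: card x sits at position (a*x+b) % n
def pvInv (n a b : Int) (deck : List Int) : Prop :=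
  deck.length = n.toNat ∧ Int.gcd a n = 1 ∧
  ∀ x : Nat, x < n.toNat → deck[((a * x + b) % n).toNat]? = some (x : Int)

lemma pvEmodCong {n a b : Int} (h : a ≡ b [ZMOD n]) (h0 : 0 ≤ b) (h1 : b < n) : a % n = b := by
  rw [Int.ModEq] at h; rw [h, Int.emod_eq_of_lt h0 h1]

lemma pvSelfCong (a n : Int) : a % n ≡ a [ZMOD n] := Int.emod_emod_of_dvd a dvd_rfl

lemma pvInj {n c e : Int} (hn : 1 ≤ n) (hg : Int.gcd c n = 1) {s t : Nat}
    (hs : s < n.toNat) (ht : t < n.toNat)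
    (h : ((c * s + e) % n).toNat = ((c * t + e) % n).toNat) : s = t := by
  have hne : n ≠ 0 := by omega
  have b1 : 0 ≤ (c * s + e) % n := Int.emod_nonneg _ hne
  have b2 : 0 ≤ (c * t + e) % n := Int.emod_nonneg _ hne
  have hmod : (c * (s : Int) + e) ≡ (c * (t : Int) + e) [ZMOD n] := by
    have : (c * (s : Int) + e) % n = (c * (t : Int) + e) % n := by omega
    exact this
  have hdvd : n ∣ c * ((t : Int) - s) := by
    have := hmod.dvd
    have heq : (c * (t : Int) + e) - (c * (s : Int) + e) = c * ((t : Int) - s) := by ring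
    rwa [heq] at this
  have hcop : IsCoprime n c := (Int.isCoprime_iff_gcd_eq_one.mpr hg).symm
  have hz : (t : Int) - s = 0 := by
    refine Int.eq_zero_of_abs_lt_dvd (hcop.dvd_of_dvd_mul_left hdvd) ?_
    have hs' : (s : Int) < n := by omega
    have ht' : (t : Int) < n := by omega
    rw [abs_lt]; omega
  omega

lemma pvSurj {n c e : Int} (hn : 1 ≤ n) (hg : Int.gcd c n = 1) :
    ∀ i : Nat, i < n.toNat → ∃ x : Nat, x < n.toNat ∧ ((c * x + e) % n).toNat = i := by
  have hne : n ≠ 0 := by omega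
  have hb : ∀ x : Nat, ((c * x + e) % n).toNat < n.toNat := by
    intro x
    have := Int.emod_nonneg (c * (x : Int) + e) hne
    have := Int.emod_lt_of_pos (c * (x : Int) + e) (show (0:Int) < n by omega)
    omega
  let f : Fin n.toNat → Fin n.toNat := fun x => ⟨((c * x + e) % n).toNat, hb x⟩
  have hinj : Function.Injective f := by
    intro x y hxy
    exact Fin.ext (pvInj hn hg x.isLt y.isLt (congrArg Fin.val hxy))
  have hsurj : Function.Surjective f := Finite.injective_iff_surjective.mp hinj
  intro i hi
  obtain ⟨x, hx⟩ := hsurj ⟨i, hi⟩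
  exact ⟨x.val, x.isLt, congrArg Fin.val hx⟩

lemma pvInv_reverse {n a b : Int} {deck : List Int} (hn : 1 ≤ n) (h : pvInv n a b deck) :
    pvInv n (-a % n) ((n - 1 - b) % n) deck.reverse := by
  obtain ⟨hl, hg, he⟩ := h
  refine ⟨by simpa using hl, by rw [Int.gcd_emod, Int.neg_gcd]; exact hg, ?_⟩
  intro x hx
  set p := (a * x + b) % n with hp
  have hne : n ≠ 0 := by omega
  have hp0 : 0 ≤ p := Int.emod_nonneg _ hne
  have hp1 : p < n := Int.emod_lt_of_pos _ (by omega)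
  have hq : (-a % n * x + (n - 1 - b) % n) % n = n - 1 - p := by
    apply pvEmodCong ?_ (by omega) (by omega)
    calc -a % n * (x : Int) + (n - 1 - b) % n
        ≡ -a * x + (n - 1 - b) [ZMOD n] :=
          Int.ModEq.add (Int.ModEq.mul_right _ (pvSelfCong _ _)) (pvSelfCong _ _)
      _ = n - 1 - (a * x + b) := by ring
      _ ≡ n - 1 - p [ZMOD n] := Int.ModEq.sub (Int.ModEq.refl _) (pvSelfCong _ _).symm
  rw [hq]
  have hlt : (n - 1 - p).toNat < deck.length := by omega
  rw [List.getElem?_reverse hlt, hl]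
  have : n.toNat - 1 - (n - 1 - p).toNat = p.toNat := by omega
  rw [this]
  exact he x hx

lemma pvCut_eq {n k : Int} (deck : List Int) (hn : 1 ≤ n) (hd : deck.length = n.toNat)
    (h1 : -n ≤ k) (h2 : k ≤ n) :
    pvCutDeck deck k = deck.drop (k % n).toNat ++ deck.take (k % n).toNat := by
  unfold pvCutDeck
  by_cases hk0 : 0 ≤ k
  · by_cases hkn : k < n
    · rw [PySem.List.slice_from _ hk0, PySem.List.slice_to _ hk0, Int.emod_eq_of_lt hk0 hkn]
    · have hkn' : k = n := by omega
      subst hkn'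
      rw [PySem.List.slice_from _ hk0, PySem.List.slice_to _ hk0, Int.emod_self]
      rw [← hd]
      simp
  · have hj : 0 < (-k).toNat := by omega
    have hkrw : k = -(((-k).toNat : Nat) : Int) := by omega
    have hmod : (k % n).toNat = deck.length - (-k).toNat := by
      have h1 : (k + n) % n = k % n := by
        simpa using Int.add_mul_emod_self_left k n 1
      have h2 : (k + n) % n = k + n := Int.emod_eq_of_lt (by omega) (by omega)
      omega
    rw [hkrw, PySem.List.slice_from_neg_natCast _ _ hj, PySem.List.slice_to_neg_natCast _ _ hj]
    rw [← hkrw, hmod]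

-- Python slicing clamps: a cut by k outside [-n, n] acts exactly like a cut by the clamped value
lemma pvCut_clamp {n k : Int} (deck : List Int) (hn : 1 ≤ n) (hd : deck.length = n.toNat) :
    pvCutDeck deck k = pvCutDeck deck (max (-n) (min n k)) := by
  by_cases hlo : k < -n
  · have he : max (-n) (min n k) = -n := by
      have h1 : min n k = k := min_eq_right (by omega)
      rw [h1]; exact max_eq_left (by omega)
    rw [he]
    unfold pvCutDeck
    have hj1 : 0 < (-k).toNat := by omega
    have hj2 : 0 < n.toNat := by omega
    have hk : k = -((((-k).toNat : Nat)) : Int) := by omega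
    have hnn : -n = -(((n.toNat : Nat)) : Int) := by omega
    rw [hk, hnn, PySem.List.slice_from_neg_natCast _ _ hj1, PySem.List.slice_to_neg_natCast _ _ hj1,
      PySem.List.slice_from_neg_natCast _ _ hj2, PySem.List.slice_to_neg_natCast _ _ hj2]
    have e1 : deck.length - (-k).toNat = 0 := by omega
    have e2 : deck.length - n.toNat = 0 := by omega
    rw [e1, e2]
  · by_cases hhi : n < k
    · have he : max (-n) (min n k) = n := by
        have h1 : min n k = n := min_eq_left (by omega)
        rw [h1]; exact max_eq_right (by omega)
      rw [he]
      unfold pvCutDeck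
      rw [PySem.List.slice_from _ (by omega : (0:Int) ≤ k), PySem.List.slice_to _ (by omega : (0:Int) ≤ k),
        PySem.List.slice_from _ (by omega : (0:Int) ≤ n), PySem.List.slice_to _ (by omega : (0:Int) ≤ n)]
      rw [List.drop_eq_nil_of_le (by omega), List.drop_eq_nil_of_le (by omega),
        List.take_of_length_le (by omega), List.take_of_length_le (by omega)]
    · have he : max (-n) (min n k) = k := by
        have h1 : min n k = k := min_eq_right (by omega)
        rw [h1]; exact max_eq_right (by omega)
      rw [he]

lemma pvInv_cut {n a b k : Int} {deck : List Int} (hn : 1 ≤ n) (h1 : -n ≤ k) (h2 : k ≤ n)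
    (h : pvInv n a b deck) : pvInv n a ((b - k) % n) (pvCutDeck deck k) := by
  obtain ⟨hl, hg, he⟩ := h
  have hne : n ≠ 0 := by omega
  have hj0 : 0 ≤ k % n := Int.emod_nonneg _ hne
  have hj1 : k % n < n := Int.emod_lt_of_pos _ (by omega)
  have hkj : (((k % n).toNat : Nat) : Int) = k % n := Int.toNat_of_nonneg hj0
  rw [pvCut_eq deck hn hl h1 h2]
  refine ⟨by simp [hl]; omega, hg, ?_⟩
  intro x hx
  have hp0 : 0 ≤ (a * x + b) % n := Int.emod_nonneg _ hne
  have hp1 : (a * x + b) % n < n := Int.emod_lt_of_pos _ (by omega)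
  have hq : (a * x + (b - k) % n) % n =
      (if (((k % n).toNat : Nat) : Int) ≤ (a * x + b) % n
        then (a * x + b) % n - (k % n).toNat
        else (a * x + b) % n - (k % n).toNat + n) := by
    apply pvEmodCong ?_ (by split_ifs <;> omega) (by split_ifs <;> omega)
    have c1 : a * (x : Int) + (b - k) % n ≡ a * x + (b - k) [ZMOD n] :=
      Int.ModEq.add (Int.ModEq.refl _) (pvSelfCong _ _)
    have c2 : (a * (x : Int) + b) % n - k % n ≡ (a * x + b) - k [ZMOD n] :=
      Int.ModEq.sub (pvSelfCong _ _) (pvSelfCong _ _)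
    have c3 : (a * (x : Int) + b) % n - k % n ≡
        (if (((k % n).toNat : Nat) : Int) ≤ (a * x + b) % n
          then (a * x + b) % n - (k % n).toNat
          else (a * x + b) % n - (k % n).toNat + n) [ZMOD n] := by
      split_ifs
      · rw [hkj]
      · rw [hkj]
        have h4 : ((a * (x : Int) + b) % n - k % n + n) % n = ((a * x + b) % n - k % n) % n := by
          simpa using Int.add_mul_emod_self_left ((a * (x : Int) + b) % n - k % n) n 1
        exact h4.symm
    calc a * (x : Int) + (b - k) % n ≡ a * x + (b - k) [ZMOD n] := c1
      _ = (a * x + b) - k := by ring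
      _ ≡ (a * (x : Int) + b) % n - k % n [ZMOD n] := c2.symm
      _ ≡ _ [ZMOD n] := c3
  rw [hq]
  by_cases hcase : (((k % n).toNat : Nat) : Int) ≤ (a * x + b) % n
  · rw [if_pos hcase]
    rw [List.getElem?_append_left (by rw [List.length_drop]; omega)]
    rw [List.getElem?_drop]
    have hidx : (k % n).toNat + ((a * (x : Int) + b) % n - (k % n).toNat).toNat
        = ((a * x + b) % n).toNat := by omega
    rw [hidx]
    exact he x hx
  · rw [if_neg hcase]
    rw [List.getElem?_append_right (by rw [List.length_drop]; omega)]
    rw [List.length_drop, List.getElem?_take]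
    have hidx : ((a * (x : Int) + b) % n - (k % n).toNat + n).toNat
        - (deck.length - (k % n).toNat) = ((a * x + b) % n).toNat := by omega
    rw [hidx, if_pos (by omega)]
    exact he x hx

lemma pvSetD_emod {n idx : Int} (nd : List Int) (v : Int) (_hn : 1 ≤ n) (hnd : nd.length = n.toNat)
    (hlo : -(n-1) ≤ idx) (hhi : idx ≤ n - 1) :
    PySem.List.pySetD nd idx v = nd.set ((idx % n).toNat) v := by
  by_cases h0 : 0 ≤ idx
  · rw [PySem.List.pySetD_of_nonneg _ _ h0, Int.emod_eq_of_lt h0 (by omega)]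
  · have hlen : -(nd.length : Int) ≤ idx := by omega
    have hmod : idx % n = idx + n := by
      have h1 : (idx + n) % n = idx % n := by
        simpa using Int.add_mul_emod_self_left idx n 1
      have h2 : (idx + n) % n = idx + n := Int.emod_eq_of_lt (by omega) (by omega)
      omega
    unfold PySem.List.pySetD PySem.List.pySet? PySem.List.pyIdx?
    rw [if_neg h0, if_pos hlen]
    simp only [Option.map_some, Option.getD_some]
    congr 1
    omega

lemma pvIdx_step {n m : Int} (_hn : 1 ≤ n) (hm1 : -1 ≤ m) (hm2 : m ≤ n + 1)
    {k : Nat} {idx : Int} (hk : (k : Int) + 2 ≤ n)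
    (hlo : -(n-1) ≤ idx) (hhi : idx ≤ n - 1) (hc : idx ≡ (k : Int) * m [ZMOD n]) :
    (-(n-1) ≤ (if idx + m > n - 1 then idx + m - n else idx + m)) ∧
    ((if idx + m > n - 1 then idx + m - n else idx + m) ≤ n - 1) ∧
    ((if idx + m > n - 1 then idx + m - n else idx + m) ≡ ((k : Int) + 1) * m [ZMOD n]) := by
  have hd : n ∣ (k : Int) * m - idx := hc.dvd
  split_ifs with hcond
  · refine ⟨by omega, ?_, ?_⟩
    · by_contra hcon
      have hidx : idx = n - 1 := by omega
      have hmv : m = n + 1 := by omega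
      have h3 : (k : Int) * m - idx = n * k + ((k : Int) - n + 1) := by rw [hmv, hidx]; ring
      have h4 : n ∣ n * (k : Int) := Dvd.intro _ rfl
      have h5 : n ∣ (k : Int) - n + 1 := (Int.dvd_add_right h4).mp (h3 ▸ hd)
      have := Int.eq_zero_of_abs_lt_dvd h5 (by rw [abs_lt]; omega)
      omega
    · calc idx + m - n ≡ idx + m [ZMOD n] := Int.sub_emod_right _ _
        _ ≡ (k : Int) * m + m [ZMOD n] := Int.ModEq.add_right _ hc
        _ = ((k : Int) + 1) * m := by ring
  · refine ⟨?_, by omega, ?_⟩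
    · by_contra hcon
      have hidx : idx = -(n - 1) := by omega
      have hmv : m = -1 := by omega
      have h3 : (k : Int) * m - idx = n - 1 - k := by rw [hmv, hidx]; ring
      have h5 : n ∣ n - 1 - (k : Int) := h3 ▸ hd
      have := Int.eq_zero_of_abs_lt_dvd h5 (by rw [abs_lt]; omega)
      omega
    · calc idx + m ≡ (k : Int) * m + m [ZMOD n] := Int.ModEq.add_right _ hc
        _ = ((k : Int) + 1) * m := by ring

lemma pvDwi_loop {n m : Int} (hn : 1 ≤ n) (hm1 : -1 ≤ m) (hm2 : m ≤ n + 1)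
    (hg : Int.gcd m n = 1) :
    ∀ (rest nd : List Int) (k : Nat) (idx : Int),
      nd.length = n.toNat → (k : Int) + rest.length = n →
      -(n-1) ≤ idx → idx ≤ n - 1 → idx ≡ (k : Int) * m [ZMOD n] →
      (pvDwiLoop m rest nd idx).length = n.toNat ∧
      (∀ i : Nat, i < n.toNat →
        (∀ t : Nat, t < rest.length → ((((k + t : Nat) : Int)) * m % n).toNat ≠ i) →
        (pvDwiLoop m rest nd idx)[i]? = nd[i]?) ∧
      (∀ t : Nat, t < rest.length →
        (pvDwiLoop m rest nd idx)[((((k + t : Nat) : Int)) * m % n).toNat]? = rest[t]?) := by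
  have hne : n ≠ 0 := by omega
  have hposb : ∀ t : Nat, (((t : Int)) * m % n).toNat < n.toNat := by
    intro t
    have := Int.emod_nonneg ((t : Int) * m) hne
    have := Int.emod_lt_of_pos ((t : Int) * m) (show (0 : Int) < n by omega)
    omega
  have hinj : ∀ s t : Nat, s < n.toNat → t < n.toNat →
      (((s : Int)) * m % n).toNat = (((t : Int)) * m % n).toNat → s = t := by
    intro s t hs ht hEq
    refine pvInj (c := m) (e := 0) hn hg hs ht ?_
    simp only [add_zero]
    rw [mul_comm m (s : Int), mul_comm m (t : Int)]
    exact hEq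
  intro rest
  induction rest with
  | nil =>
    intro nd k idx hnd hlen hlo hhi hc
    refine ⟨hnd, fun i _ _ => rfl, fun t ht => absurd ht (by simp)⟩
  | cons c rest' ih =>
    intro nd k idx hnd hlen hlo hhi hc
    have hNn : ((n.toNat : Nat) : Int) = n := by omega
    have hloop : pvDwiLoop m (c :: rest') nd idx
        = pvDwiLoop m rest' (nd.set ((idx % n).toNat) c)
            (if idx + m > n - 1 then idx + m - n else idx + m) := by
      show pvDwiLoop m rest' (PySem.List.pySetD nd idx c) _ = _
      rw [pvSetD_emod nd c hn hnd hlo hhi]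
      congr 1
      simp only [PySem.List.len_eq, List.length_set, hnd, hNn]
    have hsetIdx : (idx % n).toNat = (((k : Int)) * m % n).toNat :=
      congrArg Int.toNat hc
    have hkN : k < n.toNat := by
      have : (0 : Int) ≤ rest'.length := by positivity
      simp only [List.length_cons] at hlen
      push_cast at hlen
      omega
    rw [hloop]
    by_cases hre : rest' = []
    · subst hre
      have hk1 : (k : Int) + 1 = n := by
        simp only [List.length_cons, List.length_nil] at hlen
        push_cast at hlen
        omega
      refine ⟨by simp [pvDwiLoop, hnd], ?_, ?_⟩
      · intro i hi hunt
        have h0 : (((k : Int)) * m % n).toNat ≠ i := by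
          have := hunt 0 (by simp)
          simpa using this
        simp only [pvDwiLoop]
        rw [List.getElem?_set, if_neg (by rw [hsetIdx]; exact h0)]
      · intro t ht
        have ht0 : t = 0 := by simpa using ht
        subst ht0
        simp only [pvDwiLoop, Nat.add_zero]
        rw [hsetIdx, List.getElem?_set_self (by rw [hnd]; exact hposb k)]
        rfl
    · have hre1 : 1 ≤ rest'.length := by
        cases rest' with
        | nil => exact absurd rfl hre
        | cons _ _ => simp
      have hk2 : (k : Int) + 2 ≤ n := by
        simp only [List.length_cons] at hlen
        push_cast at hlen
        omega
      obtain ⟨s1, s2, s3⟩ := pvIdx_step hn hm1 hm2 hk2 hlo hhi hc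
      obtain ⟨ihlen, ihunt, ihhit⟩ :=
        ih (nd.set ((idx % n).toNat) c) (k + 1)
          (if idx + m > n - 1 then idx + m - n else idx + m)
          (by simp [hnd])
          (by simp only [List.length_cons] at hlen; push_cast at hlen ⊢; omega)
          s1 s2 (by push_cast; exact s3)
      refine ⟨ihlen, ?_, ?_⟩
      · intro i hi hunt
        have h0 : (((k : Int)) * m % n).toNat ≠ i := by
          have := hunt 0 (by simp)
          simpa using this
        rw [ihunt i hi ?later]
        case later =>
          intro t' ht'
          have hnat : k + 1 + t' = k + (1 + t') := by omega
          rw [hnat]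
          exact hunt (1 + t') (by simp only [List.length_cons]; omega)
        rw [List.getElem?_set, if_neg (by rw [hsetIdx]; exact h0)]
      · intro t ht
        by_cases ht0 : t = 0
        · subst ht0
          simp only [Nat.add_zero]
          rw [ihunt _ (hposb k) ?nohit]
          case nohit =>
            intro t' ht' hEq
            have hlt : k + 1 + t' < n.toNat := by
              simp only [List.length_cons] at hlen
              push_cast at hlen
              omega
            have := hinj (k + 1 + t') k hlt hkN hEq
            omega
          rw [hsetIdx, List.getElem?_set_self (by rw [hnd]; exact hposb k)]
          rfl
        · have ht' : t - 1 < rest'.length := by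
            simp only [List.length_cons] at ht
            omega
          have hthis := ihhit (t - 1) ht'
          have hnat : k + 1 + (t - 1) = k + t := by omega
          rw [hnat] at hthis
          have hcons : (c :: rest')[t]? = rest'[t - 1]? := by
            rcases t with _ | t2
            · exact absurd rfl ht0
            · simp
          rw [hcons]
          exact hthis

lemma pvDwi_spec {n m : Int} (hn : 1 ≤ n) (hm : n = 1 ∨ (-1 ≤ m ∧ m ≤ n + 1))
    (hg : Int.gcd m n = 1) (deck : List Int) (hd : deck.length = n.toNat) :
    (pvDealWithIncrement deck m).length = n.toNat ∧
    ∀ t : Nat, t < n.toNat →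
      (pvDealWithIncrement deck m)[(((t : Int)) * m % n).toNat]? = deck[t]? := by
  rcases hm with h1 | ⟨hm1, hm2⟩
  · subst h1
    obtain ⟨d0, hdeck⟩ := List.length_eq_one_iff.mp (by rw [hd]; rfl)
    subst hdeck
    have hcomp : pvDealWithIncrement [d0] m = [d0] := by
      simp [pvDealWithIncrement, pvDwiLoop, PySem.List.pySetD_of_nonneg _ _ (le_refl (0 : Int))]
    refine ⟨by rw [hcomp]; rfl, ?_⟩
    intro t ht
    have ht0 : t = 0 := by omega
    subst ht0
    rw [hcomp]
    simp
  · have hres := pvDwi_loop hn hm1 hm2 hg deck (List.replicate deck.length 0) 0 0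
      (by simp [hd]) (by rw [hd]; simp; omega) (by omega) (by omega)
      (by show (0 : Int) % n = ((0 : Int) * m) % n; norm_num)
    obtain ⟨l1, l2, l3⟩ := hres
    refine ⟨l1, ?_⟩
    intro t ht
    have := l3 t (by rw [hd]; exact ht)
    simpa using this

lemma pvInv_dwi {n a b m : Int} {deck : List Int} (hn : 1 ≤ n)
    (hm : n = 1 ∨ (-1 ≤ m ∧ m ≤ n + 1)) (hg : Int.gcd (m % n) n = 1)
    (h : pvInv n a b deck) : pvInv n (a * m % n) (b * m % n) (pvDealWithIncrement deck m) := by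
  obtain ⟨hl, hga, he⟩ := h
  have hne : n ≠ 0 := by omega
  have hgm : Int.gcd m n = 1 := by rwa [Int.gcd_emod] at hg
  obtain ⟨dl, dspec⟩ := pvDwi_spec hn hm hgm deck hl
  refine ⟨dl, ?_, ?_⟩
  · rw [Int.gcd_emod]
    exact Int.isCoprime_iff_gcd_eq_one.mp
      (IsCoprime.mul_left (Int.isCoprime_iff_gcd_eq_one.mpr hga)
        (Int.isCoprime_iff_gcd_eq_one.mpr hgm))
  · intro x hx
    have hp0 : 0 ≤ (a * x + b) % n := Int.emod_nonneg _ hne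
    have hp1 : (a * x + b) % n < n := Int.emod_lt_of_pos _ (by omega)
    have hptn : ((((a * (x : Int) + b) % n).toNat : Nat) : Int) = (a * x + b) % n :=
      Int.toNat_of_nonneg hp0
    have hidx : (a * m % n * x + b * m % n) % n
        = (((((a * (x : Int) + b) % n).toNat : Nat) : Int) * m) % n := by
      have c1 : a * m % n * (x : Int) + b * m % n ≡ (a * m) * x + b * m [ZMOD n] :=
        Int.ModEq.add (Int.ModEq.mul_right _ (pvSelfCong _ _)) (pvSelfCong _ _)
      have c2 : ((a * (x : Int) + b) % n) * m ≡ (a * x + b) * m [ZMOD n] :=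
        Int.ModEq.mul_right _ (pvSelfCong _ _)
      rw [Int.ModEq] at c1 c2
      calc (a * m % n * (x : Int) + b * m % n) % n = ((a * m) * x + b * m) % n := c1
        _ = ((a * x + b) * m) % n := by ring_nf
        _ = (((a * (x : Int) + b) % n) * m) % n := c2.symm
        _ = (((((a * (x : Int) + b) % n).toNat : Nat) : Int) * m) % n := by rw [hptn]
    rw [hidx, dspec (((a * (x : Int) + b) % n).toNat) (by omega)]
    exact he x hx

lemma pvScatter {n a b : Int} (hn : 1 ≤ n) (hg : Int.gcd a n = 1) :
    ((List.range n.toNat).foldl (fun dk x => dk.set (((a * x + b) % n).toNat) (x : Int))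
        (List.replicate n.toNat 0)).length = n.toNat ∧
    ∀ x : Nat, x < n.toNat →
      ((List.range n.toNat).foldl (fun dk x => dk.set (((a * x + b) % n).toNat) (x : Int))
        (List.replicate n.toNat 0))[((a * x + b) % n).toNat]? = some (x : Int) := by
  have hne : n ≠ 0 := by omega
  have hb : ∀ x : Nat, ((a * x + b) % n).toNat < n.toNat := by
    intro x
    have := Int.emod_nonneg (a * (x : Int) + b) hne
    have := Int.emod_lt_of_pos (a * (x : Int) + b) (show (0 : Int) < n by omega)
    omega
  have key : ∀ j : Nat, j ≤ n.toNat →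
      ((List.range j).foldl (fun dk x => dk.set (((a * x + b) % n).toNat) (x : Int))
        (List.replicate n.toNat 0)).length = n.toNat ∧
      ∀ x : Nat, x < j →
        ((List.range j).foldl (fun dk x => dk.set (((a * x + b) % n).toNat) (x : Int))
          (List.replicate n.toNat 0))[((a * x + b) % n).toNat]? = some (x : Int) := by
    intro j
    induction j with
    | zero => exact fun _ => ⟨by simp, fun x hx => absurd hx (by omega)⟩
    | succ j ih =>
      intro hj
      obtain ⟨ihl, ihe⟩ := ih (by omega)
      rw [List.range_succ, List.foldl_append, List.foldl_cons, List.foldl_nil]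
      refine ⟨by simpa using ihl, ?_⟩
      intro x hx
      by_cases hxj : x = j
      · subst hxj
        exact List.getElem?_set_self (by rw [ihl]; exact hb x)
      · rw [List.getElem?_set, if_neg ?hne]
        · exact ihe x (by omega)
        · intro hEq
          exact hxj ((pvInj hn hg (by omega) (by omega) hEq.symm))
  exact ⟨(key n.toNat le_rfl).1, fun x hx => (key n.toNat le_rfl).2 x hx⟩

lemma pvUnique {n a b : Int} {d1 d2 : List Int} (hn : 1 ≤ n) (hg : Int.gcd a n = 1)
    (l1 : d1.length = n.toNat) (l2 : d2.length = n.toNat)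
    (h1 : ∀ x : Nat, x < n.toNat → d1[((a * x + b) % n).toNat]? = some (x : Int))
    (h2 : ∀ x : Nat, x < n.toNat → d2[((a * x + b) % n).toNat]? = some (x : Int)) :
    d1 = d2 := by
  apply List.ext_getElem?
  intro i
  by_cases hi : i < n.toNat
  · obtain ⟨x, hx, hpos⟩ := pvSurj (c := a) (e := b) hn hg i hi
    rw [← hpos, h1 x hx, h2 x hx]
  · rw [List.getElem?_eq_none (by omega), List.getElem?_eq_none (by omega)]

lemma pvMainFold {n : Int} (hn : 1 ≤ n) :
    ∀ (instrs : List String) (deck : List Int) (a b : Int),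
      instrs.all (pvInstrOk n) = true → pvInv n a b deck →
      pvInv n (instrs.foldl (pvAltStep n) (a, b)).1 (instrs.foldl (pvAltStep n) (a, b)).2
        (instrs.foldl pvShuffleStep deck) := by
  have hpos : (0 : Int) < n := by omega
  intro instrs
  induction instrs with
  | nil => intro deck a b _ hInv; simpa using hInv
  | cons i rest ih =>
    intro deck a b hall hInv
    rw [List.all_cons, Bool.and_eq_true] at hall
    obtain ⟨hok, hall'⟩ := hall
    rw [List.foldl_cons, List.foldl_cons]
    unfold pvInstrOk at hok
    by_cases hdwi : PySem.Str.isIn "deal with increment" i = true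
    · rw [if_pos hdwi] at hok
      cases hp : pvParse? i with
      | none => rw [hp] at hok; simp at hok
      | some mval =>
        rw [hp] at hok
        have hstepA : pvShuffleStep deck i = pvDealWithIncrement deck mval := by
          unfold pvShuffleStep; rw [if_pos hdwi]; unfold pvGetInstructionValue; rw [hp]; rfl
        have hstepB : pvAltStep n (a, b) i = (a * mval % n, b * mval % n) := by
          unfold pvAltStep; rw [if_pos hdwi, hp]
          simp [PySem.Int.mod_eq_emod_of_pos hpos]
        rw [hstepA, hstepB]
        apply ih _ _ _ hall'
        simp only [Bool.or_eq_true, Bool.and_eq_true, decide_eq_true_eq] at hok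
        refine pvInv_dwi hn ?_ ?_ hInv
        · rcases hok with h1 | ⟨h2, _⟩
          · left; omega
          · right; exact h2
        · rcases hok with h1 | ⟨_, h3⟩
          · have hn1 : n = 1 := by omega
            subst hn1
            simp
          · rwa [PySem.Int.mod_eq_emod_of_pos hpos] at h3
    · by_cases hcut : PySem.Str.isIn "cut " i = true
      · rw [if_neg hdwi, if_pos hcut] at hok
        cases hp : pvParse? i with
        | none => rw [hp] at hok; simp at hok
        | some kval =>
          have hstepA : pvShuffleStep deck i = pvCutDeck deck kval := by
            unfold pvShuffleStep; rw [if_neg hdwi, if_pos hcut]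
            unfold pvGetInstructionValue; rw [hp]; rfl
          have hstepB : pvAltStep n (a, b) i = (a, (b - max (-n) (min n kval)) % n) := by
            unfold pvAltStep; rw [if_neg hdwi, if_pos hcut, hp]
            simp [PySem.Int.mod_eq_emod_of_pos hpos]
          rw [hstepA, hstepB]
          apply ih _ _ _ hall'
          rw [pvCut_clamp deck hn hInv.1]
          exact pvInv_cut hn (le_max_left _ _)
            (max_le (by omega) (min_le_left _ _)) hInv
      · have hstepA : pvShuffleStep deck i = pvDealIntoNewStack deck := by
          unfold pvShuffleStep; rw [if_neg hdwi, if_neg hcut]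
        have hstepB : pvAltStep n (a, b) i = (-a % n, (n - 1 - b) % n) := by
          unfold pvAltStep; rw [if_neg hdwi, if_neg hcut]
          simp [PySem.Int.mod_eq_emod_of_pos hpos]
        rw [hstepA, hstepB]
        exact ih _ _ _ hall' (pvInv_reverse hn hInv)

lemma pvStep_nil (instruction : String) : pvShuffleStep [] instruction = [] := by
  unfold pvShuffleStep pvDealWithIncrement pvDealIntoNewStack pvCutDeck
  split_ifs <;> simp [pvDwiLoop, PySem.List.slice]

lemma pvFold_nil (instrs : List String) : instrs.foldl pvShuffleStep [] = [] := by
  induction instrs with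
  | nil => rfl
  | cons i rest ih => simpa [List.foldl_cons, pvStep_nil] using ih

-- ===== VERDICT (by name: the statement is the Claim_ definition above) =====
theorem shuffleNewDeck_spec : Claim_equal_shuffleNewDeck := by
  unfold Claim_equal_shuffleNewDeck
  intro deckSize instructions _ hpre
  unfold Spec_shuffleNewDeck shuffleNewDeck shuffleNewDeck_alt
  by_cases hle : deckSize ≤ 0
  · rw [if_pos hle, PySem.List.pyRange_one_eq_nil hle]
    exact pvFold_nil instructions
  · rw [if_neg hle]
    have hn : (1 : Int) ≤ deckSize := by omega
    have hInv0 : pvInv deckSize 1 0 (PySem.List.pyRange 0 deckSize 1) := by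
      refine ⟨by rw [PySem.List.length_pyRange_one]; simp, Int.gcd_one_left _, ?_⟩
      intro x hx
      have hxn : (x : Int) < deckSize := by omega
      have hmod : ((1 * (x : Int) + 0) % deckSize) = (x : Int) := by
        rw [one_mul, add_zero, Int.emod_eq_of_lt (by positivity) hxn]
      rw [hmod]
      have htn : ((x : Int)).toNat = x := Int.toNat_natCast x
      rw [htn, PySem.List.getElem?_pyRange_one, if_pos (by omega)]
      simp
    have hfold := pvMainFold hn instructions (PySem.List.pyRange 0 deckSize 1) 1 0 hpre hInv0
    obtain ⟨hLa, hGa, hEa⟩ := hfold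
    have hBs : (PySem.List.pyRange 0 deckSize 1).foldl
        (fun deck x => PySem.List.pySetD deck
          (PySem.Int.mod ((instructions.foldl (pvAltStep deckSize) (1, 0)).1 * x
            + (instructions.foldl (pvAltStep deckSize) (1, 0)).2) deckSize) x)
        (List.replicate deckSize.toNat 0)
      = (List.range deckSize.toNat).foldl
          (fun dk x => dk.set ((((instructions.foldl (pvAltStep deckSize) (1, 0)).1 * x
            + (instructions.foldl (pvAltStep deckSize) (1, 0)).2) % deckSize).toNat) (x : Int))
          (List.replicate deckSize.toNat 0) := by
      rw [PySem.List.pyRange_one, List.foldl_map]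
      have hsz : (deckSize - 0).toNat = deckSize.toNat := by norm_num
      rw [hsz]
      apply PySem.List.foldl_congr_mem
      intro acc x _
      rw [zero_add, PySem.Int.mod_eq_emod_of_pos (by omega),
        PySem.List.pySetD_of_nonneg _ _ (Int.emod_nonneg _ (by omega))]
    rw [hBs]
    obtain ⟨hLs, hEs⟩ := pvScatter (a := (instructions.foldl (pvAltStep deckSize) (1, 0)).1)
      (b := (instructions.foldl (pvAltStep deckSize) (1, 0)).2) hn hGa
    exact pvUnique hn hGa hLa hLs hEa hEs
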